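-- pv_equiv track=rewrite | github.com/Relex12/Word-machine | word_machine.py | remove_plural_words
-- ===== SOURCE A (Python) =====
-- def remove_plural_words (dictionary, lang):
--     words_to_del = []
--     if lang == 'fr':
--         for word in dictionary:
--             l = len(word)
--             if word[l-1] == 's'and word[:l-1] in dictionary \
--             or word[l-1] == 'x'and word[:l-1] in dictionary \
--             or l > 3 and word[l-3:l] == 'aux'and word[:l-3]+'al' in dictionary \
--             or l > 3 and word[l-3:l] == 'aux'and word[:l-3]+'ail' in dictionary:
--                 words_to_del.append(word)
--     words_to_del = set(words_to_del)
--     for word in words_to_del: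
--         dictionary.remove(word)
--     # insert here plural rules from other languages
--     return (dictionary)
-- ===== SOURCE B (Python) =====
-- def remove_plural_words(dictionary, lang):
--     # Forward generation: treat each word as a singular, generate its plural
--     # candidates, and mark those candidates that are present in the dictionary.
--     if lang == 'fr':
--         plurals = set()
--         for w in dictionary:
--             plurals.add(w + 's')
--             plurals.add(w + 'x')
--             if w.endswith('al') and len(w) > 2:
--                 plurals.add(w[:-2] + 'aux')
--             if w.endswith('ail') and len(w) > 3:
--                 plurals.add(w[:-3] + 'aux')
--         words_to_del = set(w for w in dictionary if w in plurals)
--     else: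
--         words_to_del = set()
--     for word in words_to_del:
--         dictionary.remove(word)
--     return dictionary
-- ===== Notes on version B (the rewrite author's own statement) =====
-- stated objective: alternative
-- what changed: Instead of testing each word backwards (strip a plural suffix and look the stem up in the dictionary), B generates each word's plural forms forward once into a set and then marks dictionary words by set membership; it trades A's per-word suffix tests with list scans for a generate-then-filter pass.
import Mathlib
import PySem

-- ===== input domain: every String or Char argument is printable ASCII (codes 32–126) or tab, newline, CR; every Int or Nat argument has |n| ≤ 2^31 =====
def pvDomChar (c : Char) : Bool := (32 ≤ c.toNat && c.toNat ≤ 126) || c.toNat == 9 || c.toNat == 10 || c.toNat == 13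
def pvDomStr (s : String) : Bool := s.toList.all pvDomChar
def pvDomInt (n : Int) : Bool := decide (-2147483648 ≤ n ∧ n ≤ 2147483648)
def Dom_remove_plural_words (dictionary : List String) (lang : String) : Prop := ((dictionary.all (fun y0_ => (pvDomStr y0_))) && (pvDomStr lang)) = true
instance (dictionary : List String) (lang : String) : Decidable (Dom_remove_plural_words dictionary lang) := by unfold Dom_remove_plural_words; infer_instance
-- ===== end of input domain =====

-- B replaces A's per-word backward suffix test (strip a suffix, look the stem up in the
-- list) by one forward plural-generation pass into a set followed by membership tests.
-- A mutates `dictionary` in place (list.remove); B performs the same removals, and the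
-- equivalence proved here is about the return value.

-- ===== PORT A =====
-- A-side helper: the 'if' condition of A's loop, verbatim
def pvCondA (dictionary : List String) (word : String) : Bool :=
  let l : Int := PySem.Str.len word
  (PySem.Str.pyGet? word (l-1) == some 's' && dictionary.contains (PySem.Str.slice word none (some (l-1))))
  || (PySem.Str.pyGet? word (l-1) == some 'x' && dictionary.contains (PySem.Str.slice word none (some (l-1))))
  || (decide (3 < l) && (PySem.Str.slice word (some (l-3)) (some l) == "aux") && dictionary.contains (PySem.Str.slice word none (some (l-3)) ++ "al"))
  || (decide (3 < l) && (PySem.Str.slice word (some (l-3)) (some l) == "aux") && dictionary.contains (PySem.Str.slice word none (some (l-3)) ++ "ail"))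

-- dictionary.remove(word): word is always a member here, so the `none` (ValueError) branch is unreachable
def pvRemoveStep (d : List String) (w : String) : List String :=
  match PySem.List.remove? d w with
  | some d' => d'
  | none => d

def remove_plural_words (dictionary : List String) (lang : String) : List String :=
  let words_to_del : List String :=
    if lang == "fr" then
      dictionary.foldl (fun acc word => if pvCondA dictionary word then acc ++ [word] else acc) []
    else []
  let wset : PySem.Set String := PySem.Set.ofList words_to_del
  wset.foldl pvRemoveStep dictionary

-- ===== PORT B =====
-- B-side helper: one iteration of B's plural-generation loop
def pvAddPlurals (s : PySem.Set String) (w : String) : PySem.Set String :=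
  let s1 := PySem.Set.add s (w ++ "s")
  let s2 := PySem.Set.add s1 (w ++ "x")
  let s3 := if PySem.Str.endswith w "al" && decide (2 < PySem.Str.len w)
            then PySem.Set.add s2 (PySem.Str.slice w none (some (-2)) ++ "aux") else s2
  if PySem.Str.endswith w "ail" && decide (3 < PySem.Str.len w)
  then PySem.Set.add s3 (PySem.Str.slice w none (some (-3)) ++ "aux") else s3

def remove_plural_words_alt (dictionary : List String) (lang : String) : List String :=
  let words_to_del : PySem.Set String :=
    if lang == "fr" then
      let plurals : PySem.Set String := dictionary.foldl pvAddPlurals PySem.Set.empty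
      PySem.Set.ofList (dictionary.filter (fun w => PySem.Set.contains plurals w))
    else PySem.Set.empty
  words_to_del.foldl pvRemoveStep dictionary

-- ===== PRECONDITION & SPEC =====
-- Pre_ excludes exactly the inputs on which Python A raises: with lang = 'fr' an empty
-- string in the dictionary makes word[l-1] raise IndexError.
def Pre_remove_plural_words (dictionary : List String) (lang : String) : Prop :=
  lang = "fr" → "" ∉ dictionary
instance (dictionary : List String) (lang : String) : Decidable (Pre_remove_plural_words dictionary lang) := by unfold Pre_remove_plural_words; infer_instance
def pvWitness_remove_plural_words : List String × String := (["chats", "chat"], "fr")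

def Spec_remove_plural_words (dictionary : List String) (lang : String) (out : List String) : Prop := out = remove_plural_words_alt dictionary lang
instance (dictionary : List String) (lang : String) (out : List String) : Decidable (Spec_remove_plural_words dictionary lang out) := by unfold Spec_remove_plural_words; infer_instance

-- ===== CLAIM (what is proved, stated in full; the proofs are below) =====
def Claim_equal_remove_plural_words : Prop := ∀ (dictionary : List String) (lang : String), Dom_remove_plural_words dictionary lang → Pre_remove_plural_words dictionary lang → Spec_remove_plural_words dictionary lang (remove_plural_words dictionary lang)


-- ===== LEMMAS AND PROOFS =====

-- the generation predicate of one step of B's loop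
def pvGen (w y : String) : Prop :=
  y = w ++ "s" ∨ y = w ++ "x"
  ∨ ((PySem.Str.endswith w "al" && decide (2 < PySem.Str.len w)) = true ∧ y = PySem.Str.slice w none (some (-2)) ++ "aux")
  ∨ ((PySem.Str.endswith w "ail" && decide (3 < PySem.Str.len w)) = true ∧ y = PySem.Str.slice w none (some (-3)) ++ "aux")

set_option maxHeartbeats 1000000 in
theorem mem_pvAddPlurals (s : PySem.Set String) (w y : String) :
    y ∈ pvAddPlurals s w ↔ y ∈ s ∨ pvGen w y := by
  unfold pvAddPlurals pvGen
  cases h1 : (PySem.Str.endswith w "al" && decide (2 < PySem.Str.len w)) <;>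
  cases h2 : (PySem.Str.endswith w "ail" && decide (3 < PySem.Str.len w)) <;>
    simp only [if_true, if_false, Bool.false_eq_true, PySem.Set.mem_add, false_and,
      true_and, or_false, false_or] <;> tauto

theorem mem_foldl_pvAddPlurals (d : List String) (s : PySem.Set String) (y : String) :
    y ∈ d.foldl pvAddPlurals s ↔ y ∈ s ∨ ∃ w ∈ d, pvGen w y := by
  induction d generalizing s with
  | nil => simp
  | cons h t ih =>
    simp only [List.foldl_cons, ih, mem_pvAddPlurals, List.mem_cons]
    constructor
    · rintro ((hs | hg) | ⟨w, hw, hg⟩)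
      exacts [Or.inl hs, Or.inr ⟨h, Or.inl rfl, hg⟩, Or.inr ⟨w, Or.inr hw, hg⟩]
    · rintro (hs | ⟨w, (rfl | hw), hg⟩)
      exacts [Or.inl (Or.inl hs), Or.inl (Or.inr hg), Or.inr ⟨w, hw, hg⟩]

-- Python y[: -m] on code points
theorem slice_neg_to {α : Type} (cs : List α) (m : Nat) (hm : 0 < m) :
    PySem.List.slice cs none (some (-(m:Int))) = cs.take (cs.length - m) := by
  simp only [PySem.List.slice, PySem.List.clampIdx]
  split_ifs with h1 h2 <;> simp <;> [skip; congr 1; skip] <;> omega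

theorem auxToList : ("aux" : String).toList = ['a','u','x'] := by decide

theorem strSliceDrop (y : String) (h3 : 3 < y.toList.length) :
    (PySem.Str.slice y (some (PySem.Str.len y - 3)) (some (PySem.Str.len y))).toList
      = y.toList.drop (y.toList.length - 3) := by
  rw [PySem.Str.toList_slice]
  simp only [PySem.Chars.slice_eq_listSlice, PySem.Str.len_eq]
  rw [show ((y.toList.length:Int) - 3) = ((y.toList.length - 3 : Nat) : Int) by omega,
      PySem.List.slice_natCast, List.take_of_length_le (by rw [List.length_drop])]

theorem strSliceTake (y : String) (h3 : 3 ≤ y.toList.length) :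
    (PySem.Str.slice y none (some (PySem.Str.len y - 3))).toList
      = y.toList.take (y.toList.length - 3) := by
  rw [PySem.Str.toList_slice]
  simp only [PySem.Chars.slice_eq_listSlice, PySem.Str.len_eq]
  rw [PySem.List.slice_to _ (by omega)]
  congr 1; omega

-- A's 's'/'x' disjuncts name exactly B's "append the suffix" generation
theorem pvSuffix_iff (d : List String) (y : String) (c : Char) (cstr : String) (hc : cstr.toList = [c]) :
    ((PySem.Str.pyGet? y (PySem.Str.len y - 1) == some c) && d.contains (PySem.Str.slice y none (some (PySem.Str.len y - 1)))) = true
      ↔ ∃ w ∈ d, y = w ++ cstr := by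
  rcases y.toList.eq_nil_or_concat with hnil | ⟨t, a, hcat⟩
  · have hy : y = "" := String.ext (by simp [hnil])
    subst hy
    constructor
    · intro h; simp [PySem.Str.pyGet?, PySem.List.pyGet?] at h
    · rintro ⟨w, -, hw⟩
      have := congrArg String.toList hw
      simp [String.toList_append, hc] at this
  · have hl : PySem.Str.len y = ((t.length + 1 : Nat) : Int) := by
      rw [PySem.Str.len_eq, hcat]; simp
    have hl1 : PySem.Str.len y - 1 = ((t.length : Nat) : Int) := by rw [hl]; push_cast; ring
    have hget : PySem.Str.pyGet? y (PySem.Str.len y - 1) = some a := by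
      rw [hl1]; simp [hcat]
    have hslice : (PySem.Str.slice y none (some (PySem.Str.len y - 1))).toList = t := by
      rw [hl1]; simp [PySem.Str.toList_slice, PySem.List.slice_to _ (Int.natCast_nonneg _), hcat]
    constructor
    · intro h
      simp only [Bool.and_eq_true, beq_iff_eq, hget, Option.some.injEq, List.contains_iff_mem] at h
      refine ⟨PySem.Str.slice y none (some (PySem.Str.len y - 1)), h.2, ?_⟩
      apply String.ext
      rw [String.toList_append, hslice, hc, hcat, h.1, List.concat_eq_append]
    · rintro ⟨w, hwmem, hw⟩
      have hwt : w.toList ++ [c] = t ++ [a] := by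
        rw [← hc, ← String.toList_append, ← hw, hcat, List.concat_eq_append]
      obtain ⟨hwt, hca⟩ := List.append_singleton_inj.mp hwt
      have hweq : PySem.Str.slice y none (some (PySem.Str.len y - 1)) = w :=
        String.ext (by rw [hslice, hwt])
      simp only [Bool.and_eq_true, beq_iff_eq, hget, Option.some.injEq, List.contains_iff_mem, hweq]
      exact ⟨hca.symm, hwmem⟩

-- A's 'aux' disjunct names exactly B's "replace the suffix sfx by aux" generation
theorem pvAuxCase_iff (d : List String) (y sfx : String) (m : Nat)
    (hm : sfx.toList.length = m) (hm0 : 0 < m) :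
    ((decide (3 < PySem.Str.len y)) && (PySem.Str.slice y (some (PySem.Str.len y - 3)) (some (PySem.Str.len y)) == "aux")
      && d.contains (PySem.Str.slice y none (some (PySem.Str.len y - 3)) ++ sfx)) = true
  ↔ ∃ w ∈ d, ((PySem.Str.endswith w sfx && decide ((m:Int) < PySem.Str.len w)) = true
      ∧ y = PySem.Str.slice w none (some (-(m:Int))) ++ "aux") := by
  constructor
  · intro h
    simp only [Bool.and_eq_true, decide_eq_true_eq, beq_iff_eq, List.contains_iff_mem] at h
    obtain ⟨⟨h3, haux⟩, hmem⟩ := h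
    have h3n : 3 < y.toList.length := by
      rw [PySem.Str.len_eq] at h3; exact_mod_cast h3
    set n := y.toList.length with hn
    have hdrop : y.toList.drop (n-3) = ['a','u','x'] := by
      have := congrArg String.toList haux
      rw [strSliceDrop y h3n, auxToList] at this
      exact this
    have htake := strSliceTake y (by omega)
    refine ⟨_, hmem, ?_, ?_⟩
    · simp only [Bool.and_eq_true, decide_eq_true_eq]
      constructor
      · rw [PySem.Str.endswith_eq, PySem.Chars.endswith_iff, String.toList_append, htake]
        exact List.suffix_append _ _
      · rw [PySem.Str.len_eq, String.toList_append, htake]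
        simp only [List.length_append, List.length_take, hm]
        push_cast; omega
    · apply String.ext
      rw [String.toList_append, PySem.Str.toList_slice]
      simp only [PySem.Chars.slice_eq_listSlice]
      rw [slice_neg_to _ m hm0]
      rw [String.toList_append, htake]
      rw [List.length_append, List.length_take, hm]
      rw [show min (n-3) n + m - m = n - 3 by omega]
      rw [List.take_append_of_le_length (by rw [List.length_take]; omega), List.take_take,
          show min (n-3) (n-3) = n-3 by omega]
      have hsplit : y.toList.take (n-3) ++ y.toList.drop (n-3) = y.toList := List.take_append_drop _ _
      rw [hdrop] at hsplit
      rw [auxToList, hsplit]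
  · rintro ⟨w, hmem, hcond, hy⟩
    simp only [Bool.and_eq_true, decide_eq_true_eq] at hcond
    obtain ⟨hsuf, hlen⟩ := hcond
    rw [PySem.Str.endswith_eq, PySem.Chars.endswith_iff] at hsuf
    obtain ⟨v, hv⟩ := hsuf
    rw [PySem.Str.len_eq] at hlen
    have hwlen : w.toList.length = v.length + m := by rw [← hv]; simp [hm]
    have hv1 : 0 < v.length := by
      have : (m:Int) < (w.toList.length : Int) := hlen
      omega
    have hyL : y.toList = v ++ ['a','u','x'] := by
      rw [hy, String.toList_append, PySem.Str.toList_slice]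
      simp only [PySem.Chars.slice_eq_listSlice]
      rw [slice_neg_to _ m hm0, hwlen, Nat.add_sub_cancel, ← hv,
          List.take_append_of_le_length (le_refl _), List.take_length, auxToList]
    have h3n : 3 < y.toList.length := by rw [hyL]; simp; omega
    have hn3 : y.toList.length - 3 = v.length := by rw [hyL]; simp
    simp only [Bool.and_eq_true, decide_eq_true_eq, beq_iff_eq, List.contains_iff_mem]
    refine ⟨⟨?_, ?_⟩, ?_⟩
    · rw [PySem.Str.len_eq]; exact_mod_cast h3n
    · apply String.ext
      rw [strSliceDrop y h3n, auxToList, hn3, hyL, List.drop_left]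
    · have heq : PySem.Str.slice y none (some (PySem.Str.len y - 3)) ++ sfx = w := by
        apply String.ext
        rw [String.toList_append, strSliceTake y (by omega), hn3, hyL, List.take_left, hv]
      rwa [heq]

set_option maxHeartbeats 1000000 in
theorem pvCondA_iff (d : List String) (y : String) :
    pvCondA d y = true ↔ ∃ w ∈ d, pvGen w y := by
  have hs := pvSuffix_iff d y 's' "s" (by decide)
  have hx := pvSuffix_iff d y 'x' "x" (by decide)
  have hal := pvAuxCase_iff d y "al" 2 (by decide) (by norm_num)
  have hail := pvAuxCase_iff d y "ail" 3 (by decide) (by norm_num)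
  simp only [Nat.cast_ofNat] at hal hail
  unfold pvCondA
  rw [Bool.or_eq_true, Bool.or_eq_true, Bool.or_eq_true, hs, hx, hal, hail]
  unfold pvGen
  constructor
  · rintro ((( ⟨w, hw, h⟩ | ⟨w, hw, h⟩) | ⟨w, hw, h⟩) | ⟨w, hw, h⟩)
    exacts [⟨w, hw, Or.inl h⟩, ⟨w, hw, Or.inr (Or.inl h)⟩,
      ⟨w, hw, Or.inr (Or.inr (Or.inl h))⟩, ⟨w, hw, Or.inr (Or.inr (Or.inr h))⟩]
  · rintro ⟨w, hw, (h | h | h | h)⟩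
    exacts [Or.inl (Or.inl (Or.inl ⟨w, hw, h⟩)), Or.inl (Or.inl (Or.inr ⟨w, hw, h⟩)),
      Or.inl (Or.inr ⟨w, hw, h⟩), Or.inr ⟨w, hw, h⟩]

theorem pvCondA_eq_contains (d : List String) (y : String) :
    pvCondA d y = PySem.Set.contains (d.foldl pvAddPlurals PySem.Set.empty) y := by
  refine Bool.eq_iff_iff.mpr ?_
  rw [pvCondA_iff, PySem.Set.contains_iff, mem_foldl_pvAddPlurals]
  simp [PySem.Set.empty]

-- ===== VERDICT (by name: the statement is the Claim_ definition above) =====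
theorem remove_plural_words_spec : Claim_equal_remove_plural_words := by
  intro dictionary lang _ _
  unfold Spec_remove_plural_words remove_plural_words remove_plural_words_alt
  by_cases hl : (lang == "fr") = true
  · simp only [hl, if_true]
    rw [PySem.List.foldl_append_if_eq_filter (pvCondA dictionary) dictionary [], List.nil_append]
    have hf : dictionary.filter (fun w => pvCondA dictionary w)
        = dictionary.filter (fun w => PySem.Set.contains (dictionary.foldl pvAddPlurals PySem.Set.empty) w) :=
      List.filter_congr (fun w _ => pvCondA_eq_contains dictionary w)
    rw [hf]
  · simp only [hl, if_false, Bool.false_eq_true]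
    rfl
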